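-- pv_equiv track=rewrite | github.com/martyav/whos_that_pokemon | pokemon.py | format_type_match
-- ===== SOURCE A (Python) =====
-- def format_type_match(strong_or_weak, list_of_types):
--     """Formats sentences within the type match-up string"""
--
--     return_text = ''
--
--     if len(list_of_types) < 1:
--         return_text += f'It is not { strong_or_weak } against anything. '
--     else:
--         for i in range(0, len(list_of_types)):
--             if len(list_of_types) < 2:
--                 return_text += f'It is { strong_or_weak } against { list_of_types[i].capitalize() }. '
--             else:
--                 if i == 0:
--                     return_text += f'It is { strong_or_weak } against { list_of_types[i].capitalize() }, '
--                 elif i == len(list_of_types) - 1: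
--                     return_text += f'and { list_of_types[i].capitalize() }. '
--                 else:
--                     return_text += f'{ list_of_types[i].capitalize() }, '
--
--     return return_text
-- ===== SOURCE B (Python) =====
-- def format_type_match(strong_or_weak, list_of_types):
--     """Formats sentences within the type match-up string"""
--     caps = [t.capitalize() for t in list_of_types]
--     if not caps:
--         return f'It is not {strong_or_weak} against anything. '
--     if len(caps) == 1:
--         return f'It is {strong_or_weak} against {caps[0]}. '
--     return (f'It is {strong_or_weak} against '
--             + ', '.join(caps[:-1]) + ', and ' + caps[-1] + '. ')
-- ===== Notes on version B (the rewrite author's own statement) =====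
-- stated objective: idiomatic
-- what changed: Replaced the index-position (first/middle/last) branching loop with capitalizing every type once and assembling the sentence by a single ', '.join over all but the last element.
import Mathlib
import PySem

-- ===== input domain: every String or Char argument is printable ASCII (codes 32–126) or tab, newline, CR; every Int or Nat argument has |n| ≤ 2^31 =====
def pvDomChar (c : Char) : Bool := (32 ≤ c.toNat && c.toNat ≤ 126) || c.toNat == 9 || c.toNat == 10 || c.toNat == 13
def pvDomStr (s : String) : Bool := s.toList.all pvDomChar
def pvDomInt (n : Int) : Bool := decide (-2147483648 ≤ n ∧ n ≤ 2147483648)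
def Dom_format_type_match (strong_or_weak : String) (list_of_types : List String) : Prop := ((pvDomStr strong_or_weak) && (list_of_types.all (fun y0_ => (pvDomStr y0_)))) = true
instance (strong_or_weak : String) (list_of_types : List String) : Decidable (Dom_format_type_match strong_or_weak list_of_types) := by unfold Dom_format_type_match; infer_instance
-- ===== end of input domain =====

-- B builds the same sentence idiomatically: capitalize every type once, then one ', '.join over
-- all but the last element, instead of A's first/middle/last index-branching loop.

-- str.capitalize(): first char uppercased, rest lowercased — exact on the ASCII domain.
def pyCapitalize (s : String) : String :=
  match s.toList with
  | [] => s
  | c :: cs => String.mk (PySem.Chars.upperChar c :: PySem.Chars.lower cs)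

-- ===== PORT A =====
def format_type_match (strong_or_weak : String) (list_of_types : List String) : String :=
  let return_text := ""
  if list_of_types.length < 1 then
    return_text ++ "It is not " ++ strong_or_weak ++ " against anything. "
  else
    (PySem.List.pyRange 0 (list_of_types.length : Int) 1).foldl (fun acc i =>
      if list_of_types.length < 2 then
        acc ++ "It is " ++ strong_or_weak ++ " against " ++
          pyCapitalize (PySem.List.pyGetD list_of_types i "") ++ ". "
      else if i = 0 then
        acc ++ "It is " ++ strong_or_weak ++ " against " ++
          pyCapitalize (PySem.List.pyGetD list_of_types i "") ++ ", "
      else if i = (list_of_types.length : Int) - 1 then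
        acc ++ "and " ++ pyCapitalize (PySem.List.pyGetD list_of_types i "") ++ ". "
      else
        acc ++ pyCapitalize (PySem.List.pyGetD list_of_types i "") ++ ", ") return_text

-- ===== PORT B =====
-- last element of a nonempty list (caps[-1])
def lastOf (c : String) (cs : List String) : String :=
  match cs with
  | [] => c
  | c' :: t => lastOf c' t

def format_type_match_alt (strong_or_weak : String) (list_of_types : List String) : String :=
  let caps := list_of_types.map pyCapitalize
  match caps with
  | [] => "It is not " ++ strong_or_weak ++ " against anything. "
  | [c] => "It is " ++ strong_or_weak ++ " against " ++ c ++ ". "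
  | c :: c' :: rest =>
      "It is " ++ strong_or_weak ++ " against " ++
        PySem.Str.join ", " ((c :: c' :: rest).dropLast) ++ ", and " ++
        lastOf c (c' :: rest) ++ ". "

-- ===== PRECONDITION & SPEC =====
def Spec_format_type_match (strong_or_weak : String) (list_of_types : List String) (out : String) : Prop := out = format_type_match_alt strong_or_weak list_of_types
instance (strong_or_weak : String) (list_of_types : List String) (out : String) : Decidable (Spec_format_type_match strong_or_weak list_of_types out) := by unfold Spec_format_type_match; infer_instance

-- ===== CLAIM (what is proved, stated in full; the proofs are below) =====
def Claim_equal_format_type_match : Prop := ∀ (strong_or_weak : String) (list_of_types : List String), Dom_format_type_match strong_or_weak list_of_types → Spec_format_type_match strong_or_weak list_of_types (format_type_match strong_or_weak list_of_types)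

-- ===== LEMMAS AND PROOFS =====

-- "C1, C2, ..., " : the closed form of what A's middle branch accumulates
def midsText : List String → String
  | [] => ""
  | z :: t => pyCapitalize z ++ ", " ++ midsText t

theorem toList_empty' : ("" : String).toList = [] := by decide

theorem lastOf_map (f : String → String) (l : List String) :
    ∀ c : String, lastOf (f c) (l.map f) = f (lastOf c l) := by
  induction l with
  | nil => intro c; rfl
  | cons c' t ih => intro c; simpa [lastOf, List.map_cons] using ih c'

theorem map_dropLast' (f : String → String) (l : List String) :
    (l.map f).dropLast = l.dropLast.map f := by
  induction l with
  | nil => rfl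
  | cons a t ih =>
    cases t with
    | nil => rfl
    | cons b t' => simpa [List.map_cons, List.dropLast_cons₂] using ih

theorem joinMids (zs : List String) : ∀ z : String,
    (PySem.Str.join ", " ((z :: zs).map pyCapitalize)).toList ++ (", " : String).toList
      = (midsText (z :: zs)).toList := by
  induction zs with
  | nil =>
    intro z
    simp [PySem.Str.toList_join, PySem.Chars.join_singleton, midsText]
  | cons z' t ih =>
    intro z
    have h := ih z'
    simp only [List.map_cons, PySem.Str.toList_join] at h ⊢
    rw [PySem.Chars.join_cons_cons]
    simp only [midsText, String.toList_append, List.append_assoc] at h ⊢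
    rw [h]

theorem joinMidsK (zs : List String) (z : String) (r : List Char) :
    (PySem.Str.join ", " ((z :: zs).map pyCapitalize)).toList ++ ((", " : String).toList ++ r)
      = (midsText (z :: zs)).toList ++ r := by
  rw [← List.append_assoc, joinMids]

theorem loopA_tail (s : String) (xs : List String) (ys : List String) :
    ∀ (y : String) (k : Nat) (acc : String),
    1 ≤ k → k + (y :: ys).length = xs.length →
    (∀ j : Nat, j < (y :: ys).length →
      PySem.List.pyGetD xs ((k + j : Nat) : Int) "" = (y :: ys).getD j "") →
    (PySem.List.pyRange (k : Int) (xs.length : Int) 1).foldl (fun acc i =>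
      if xs.length < 2 then
        acc ++ "It is " ++ s ++ " against " ++
          pyCapitalize (PySem.List.pyGetD xs i "") ++ ". "
      else if i = 0 then
        acc ++ "It is " ++ s ++ " against " ++
          pyCapitalize (PySem.List.pyGetD xs i "") ++ ", "
      else if i = (xs.length : Int) - 1 then
        acc ++ "and " ++ pyCapitalize (PySem.List.pyGetD xs i "") ++ ". "
      else
        acc ++ pyCapitalize (PySem.List.pyGetD xs i "") ++ ", ") acc
    = acc ++ midsText (y :: ys).dropLast ++ "and " ++ pyCapitalize (lastOf y ys) ++ ". " := by
  induction ys with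
  | nil =>
    intro y k acc hk hlen hget
    have hkb : (k : Int) < (xs.length : Int) := by
      simp only [List.length_cons, List.length_nil] at hlen; omega
    rw [PySem.List.pyRange_one_cons hkb,
        PySem.List.pyRange_one_eq_nil (by
          simp only [List.length_cons, List.length_nil] at hlen; omega)]
    simp only [List.foldl_cons, List.foldl_nil]
    rw [if_neg (by simp only [List.length_cons, List.length_nil] at hlen ⊢; omega),
        if_neg (by omega),
        if_pos (by simp only [List.length_cons, List.length_nil] at hlen; omega)]
    have hy : PySem.List.pyGetD xs (k : Int) "" = y := by
      have := hget 0 (by simp)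
      simpa using this
    rw [hy]
    refine String.toList_inj.mp ?_
    simp [midsText, lastOf, List.append_assoc]
  | cons y' t ih =>
    intro y k acc hk hlen hget
    have hkb : (k : Int) < (xs.length : Int) := by
      simp only [List.length_cons] at hlen; omega
    rw [PySem.List.pyRange_one_cons hkb]
    simp only [List.foldl_cons]
    rw [if_neg (by simp only [List.length_cons] at hlen ⊢; omega),
        if_neg (by omega),
        if_neg (by simp only [List.length_cons] at hlen ⊢; omega)]
    have hy : PySem.List.pyGetD xs (k : Int) "" = y := by
      have := hget 0 (by simp)
      simpa using this
    rw [hy]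
    rw [show (k : Int) + 1 = ((k + 1 : Nat) : Int) by push_cast; ring]
    rw [ih y' (k + 1) _ (by omega)
      (by simp only [List.length_cons] at hlen ⊢; omega)
      (by
        intro j hj
        have h2 : k + 1 + j = k + (j + 1) := by omega
        have h3 := hget (j + 1) (by simp only [List.length_cons] at hj ⊢; omega)
        rw [h2, h3]
        simp)]
    refine String.toList_inj.mp ?_
    simp [midsText, lastOf, List.dropLast_cons₂, List.append_assoc]

theorem format_type_match_spec : Claim_equal_format_type_match := by
  intro s xs _
  unfold Spec_format_type_match
  match xs with
  | [] =>
    simp only [format_type_match, format_type_match_alt, List.map_nil]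
    refine String.toList_inj.mp ?_
    simp
  | [a] =>
    simp only [format_type_match, format_type_match_alt, List.map_cons, List.map_nil]
    rw [if_neg (by simp)]
    rw [PySem.List.pyRange_one_cons (by norm_num),
        PySem.List.pyRange_one_eq_nil (by norm_num)]
    simp only [List.foldl_cons, List.foldl_nil]
    rw [if_pos (by norm_num)]
    rw [PySem.List.pyGetD_zero_cons]
    refine String.toList_inj.mp ?_
    simp
  | a :: y :: ys =>
    simp only [format_type_match, format_type_match_alt, List.map_cons]
    rw [if_neg (by simp)]
    rw [PySem.List.pyRange_one_cons (by
      simp only [List.length_cons]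
      push_cast
      omega)]
    simp only [List.foldl_cons]
    rw [if_neg (by simp only [List.length_cons]; omega), if_pos (by trivial)]
    rw [PySem.List.pyGetD_zero_cons]
    rw [show ((0 : Int) + 1) = ((1 : Nat) : Int) by norm_num]
    rw [loopA_tail s (a :: y :: ys) ys y 1 _ (by omega)
      (by simp only [List.length_cons]; omega)
      (by
        intro j hj
        rw [PySem.List.pyGetD_natCast]
        rw [show 1 + j = j + 1 from by omega]
        simp)]
    have hlast : lastOf (pyCapitalize a) (pyCapitalize y :: ys.map pyCapitalize) =
        pyCapitalize (lastOf a (y :: ys)) := by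
      exact lastOf_map pyCapitalize (y :: ys) a
    have hdl : (pyCapitalize a :: pyCapitalize y :: ys.map pyCapitalize).dropLast =
        ((a :: y :: ys).dropLast).map pyCapitalize := by
      simpa [List.map_cons] using map_dropLast' pyCapitalize (a :: y :: ys)
    rw [hlast, hdl]
    rw [show (", and " : String) = ", " ++ "and " from by decide]
    rw [show (a :: y :: ys).dropLast = a :: (y :: ys).dropLast from by
      simp [List.dropLast_cons₂]]
    rw [show lastOf a (y :: ys) = lastOf y ys from rfl]
    refine String.toList_inj.mp ?_
    simp only [String.toList_append, List.append_assoc, toList_empty', List.nil_append]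
    rw [joinMidsK]
    simp [midsText, String.toList_append, List.append_assoc]
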